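-- pv_equiv track=rewrite | github.com/kevmatliu/bayesian-poker | utils/filter/helpers.py | available_combo_count
-- ===== SOURCE A (Python) =====
-- def _dead_card_set(dead_cards: str = "") -> set[str]:
--     return {
--         dead_cards[i:i + 2].upper()
--         for i in range(0, len(dead_cards), 2)
--         if dead_cards[i:i + 2]
--     }
--
-- def available_combo_count(hand_class: str, dead_cards: str = "") -> int:
--     dead = _dead_card_set(dead_cards)
--
--     if len(hand_class) == 2:
--         rank = hand_class[0]
--         available_cards = [f"{rank}{suit}" for suit in _SUIT_CHARS if f"{rank}{suit}" not in dead]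
--         n = len(available_cards)
--         return (n * (n - 1)) // 2
--
--     rank1, rank2 = hand_class[0], hand_class[1]
--     suited = hand_class.endswith("s")
--
--     if suited:
--         return sum(
--             1
--             for suit in _SUIT_CHARS
--             if f"{rank1}{suit}" not in dead and f"{rank2}{suit}" not in dead
--         )
--
--     return sum(
--         1
--         for suit1 in _SUIT_CHARS
--         for suit2 in _SUIT_CHARS
--         if suit1 != suit2
--         and f"{rank1}{suit1}" not in dead
--         and f"{rank2}{suit2}" not in dead
--     )
--
-- _SUIT_CHARS = "SHDC"
-- ===== SOURCE B (Python) =====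
-- def available_combo_count(hand_class: str, dead_cards: str = "") -> int:
--     dead = {dead_cards[i:i + 2].upper() for i in range(0, len(dead_cards), 2) if dead_cards[i:i + 2]}
--     rank1, rank2 = hand_class[0], hand_class[1]
--
--     def avail(rank):
--         return [s for s in "SHDC" if rank + s not in dead]
--
--     a1 = avail(rank1)
--     if len(hand_class) == 2:
--         n = len(a1)
--         return n * (n - 1) // 2
--     a2 = avail(rank2)
--     both = sum(1 for s in a1 if s in a2)
--     if hand_class.endswith("s"):
--         return both
--     return len(a1) * len(a2) - both
-- ===== Notes on version B (the rewrite author's own statement) =====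
-- stated objective: simpler
-- what changed: B computes a per-rank available-suit list once and replaces A's nested suit1-by-suit2 offsuit double loop with the closed form |avail1|*|avail2| - |avail1 ∩ avail2| (suited = the intersection size, pair = n*(n-1)//2 over one rank's count).
import Mathlib
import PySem

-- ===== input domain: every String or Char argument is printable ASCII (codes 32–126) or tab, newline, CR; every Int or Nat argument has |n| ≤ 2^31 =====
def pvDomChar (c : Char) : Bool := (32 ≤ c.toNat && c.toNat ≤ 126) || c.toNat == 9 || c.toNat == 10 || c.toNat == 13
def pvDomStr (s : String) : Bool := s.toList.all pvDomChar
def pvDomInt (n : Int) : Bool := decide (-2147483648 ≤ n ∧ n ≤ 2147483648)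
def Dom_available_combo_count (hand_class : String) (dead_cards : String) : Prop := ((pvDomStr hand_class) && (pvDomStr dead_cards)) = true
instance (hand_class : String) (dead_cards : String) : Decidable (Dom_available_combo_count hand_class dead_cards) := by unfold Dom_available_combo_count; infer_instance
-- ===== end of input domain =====

-- B replaces A's nested suit1×suit2 offsuit loop with the closed form |avail1|·|avail2| − |avail1 ∩ avail2|
-- over per-rank available-suit lists (objective: simpler).

-- ===== PORT A =====
-- shared helper: the dead-card set {dead_cards[i:i+2].upper() for i in range(0,len,2) if dead_cards[i:i+2]}
def suitChars : List Char := ['S', 'H', 'D', 'C']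

def deadCardSet (dead_cards : String) : PySem.Set (List Char) :=
  PySem.Set.ofList ((PySem.List.pyRange 0 (dead_cards.toList.length) 2).filterMap
    (fun i =>
      let c := PySem.Chars.slice dead_cards.toList (some i) (some (i + 2))
      if c = [] then none else some (PySem.Chars.upper c)))

def available_combo_count (hand_class : String) (dead_cards : String) : Int :=
  let dead := deadCardSet dead_cards
  let hc := hand_class.toList
  if hc.length = 2 then
    match PySem.List.pyGet? hc 0 with
    | some rank =>
        let available := suitChars.filterMap (fun suit =>
          if PySem.Set.contains dead [rank, suit] then none else some [rank, suit])
        let n : Int := available.length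
        PySem.Int.floordiv (n * (n - 1)) 2
    | none => 0   -- unreachable: Python raises IndexError (outside Pre_)
  else
    match PySem.List.pyGet? hc 0, PySem.List.pyGet? hc 1 with
    | some rank1, some rank2 =>
      let suited := PySem.Str.endswith hand_class "s"
      if suited then
        ((suitChars.filter (fun suit =>
            !(PySem.Set.contains dead [rank1, suit]) && !(PySem.Set.contains dead [rank2, suit]))).length : Int)
      else
        ((suitChars.flatMap (fun suit1 => suitChars.filter (fun suit2 =>
            suit1 != suit2 && !(PySem.Set.contains dead [rank1, suit1])
              && !(PySem.Set.contains dead [rank2, suit2])))).length : Int)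
    | _, _ => 0   -- unreachable: Python raises IndexError (outside Pre_)

-- ===== PORT B =====
-- B's own copies of the suit list and dead-set builder (the ports share no definitions)
def altSuitChars : List Char := ['S', 'H', 'D', 'C']

def altDeadCardSet (dead_cards : String) : PySem.Set (List Char) :=
  PySem.Set.ofList ((PySem.List.pyRange 0 (dead_cards.toList.length) 2).filterMap
    (fun i =>
      let c := PySem.Chars.slice dead_cards.toList (some i) (some (i + 2))
      if c = [] then none else some (PySem.Chars.upper c)))

def availSuits (dead : PySem.Set (List Char)) (r : Char) : List Char :=
  altSuitChars.filter (fun s => !(PySem.Set.contains dead [r, s]))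

def available_combo_count_alt (hand_class : String) (dead_cards : String) : Int :=
  let dead := altDeadCardSet dead_cards
  let hc := hand_class.toList
  -- hand_class[0] / hand_class[1]: a missing index is Python's IndexError (outside Pre_)
  ((PySem.List.pyGet? hc 0).bind (fun r1 => (PySem.List.pyGet? hc 1).map (fun r2 =>
    let a1 := availSuits dead r1
    if hc.length = 2 then
      let n : Int := a1.length
      PySem.Int.floordiv (n * (n - 1)) 2
    else
      let a2 := availSuits dead r2
      let inter : Int := (a1.filter (fun s => a2.contains s)).length
      if PySem.Str.endswith hand_class "s" then inter
      else (a1.length : Int) * (a2.length : Int) - inter))).getD 0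

-- ===== PRECONDITION & SPEC =====
-- Pre_ excludes exactly the inputs with len(hand_class) < 2, on which A (and B) raise IndexError.
def Pre_available_combo_count (hand_class : String) (dead_cards : String) : Prop :=
  2 ≤ hand_class.toList.length

instance (hand_class : String) (dead_cards : String) : Decidable (Pre_available_combo_count hand_class dead_cards) := by
  unfold Pre_available_combo_count; infer_instance

def pvWitness_available_combo_count : String × String := ("AKo", "AS2H")

def Spec_available_combo_count (hand_class : String) (dead_cards : String) (out : Int) : Prop := out = available_combo_count_alt hand_class dead_cards
instance (hand_class : String) (dead_cards : String) (out : Int) : Decidable (Spec_available_combo_count hand_class dead_cards out) := by unfold Spec_available_combo_count; infer_instance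

-- ===== CLAIM (what is proved, stated in full; the proofs are below) =====
def Claim_equal_available_combo_count : Prop := ∀ (hand_class : String) (dead_cards : String), Dom_available_combo_count hand_class dead_cards → Pre_available_combo_count hand_class dead_cards → Spec_available_combo_count hand_class dead_cards (available_combo_count hand_class dead_cards)

-- ===== LEMMAS AND PROOFS =====

-- A's pair-branch list (build the string, filter) has the same length as B's filtered suit list.
lemma length_filterMap_if {α β : Type} (l : List α) (p : α → Bool) (f : α → β) :
    (l.filterMap (fun s => if p s then none else some (f s))).length
      = (l.filter (fun s => !(p s))).length := by
  induction l with
  | nil => rfl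
  | cons x t ih =>
      simp only [List.filterMap_cons, List.filter_cons]
      cases hp : p x <;> simp [hp, ih]

-- intersection of two filters of the same list is the filter by the conjunction
lemma length_filter_inter {α : Type} [DecidableEq α] (l : List α) (p q : α → Bool) :
    ((l.filter p).filter (fun x => (l.filter q).contains x)).length
      = (l.filter (fun x => p x && q x)).length := by
  rw [List.filter_filter]
  apply congrArg List.length
  apply List.filter_congr
  intro x hx
  by_cases hq : q x = true
  · simp [hq, hx]
  · simp at hq; simp [hq]

-- the offsuit closed form over the four concrete suits, by exhausting the 8 relevant Booleans
lemma offsuit_count (p q : Char → Bool) :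
    ((suitChars.flatMap (fun s1 => suitChars.filter (fun s2 =>
        s1 != s2 && p s1 && q s2))).length : Int)
      = ((suitChars.filter p).length : Int) * ((suitChars.filter q).length : Int)
        - (((suitChars.filter p).filter (fun s => (suitChars.filter q).contains s)).length : Int) := by
  rw [length_filter_inter suitChars p q]
  simp only [suitChars]
  rcases hpS : p 'S' <;> rcases hpH : p 'H' <;> rcases hpD : p 'D' <;> rcases hpC : p 'C' <;>
    rcases hqS : q 'S' <;> rcases hqH : q 'H' <;> rcases hqD : q 'D' <;> rcases hqC : q 'C' <;>
      simp [List.flatMap_cons, List.filter_cons, hpS, hpH, hpD, hpC, hqS, hqH, hqD, hqC]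

-- ===== VERDICT (by name: the statement is the Claim_ definition above) =====
theorem available_combo_count_spec : Claim_equal_available_combo_count := by
  intro hand_class dead_cards _ hpre
  unfold Spec_available_combo_count available_combo_count available_combo_count_alt
  unfold Pre_available_combo_count at hpre
  obtain ⟨r1, r2, rest, hhc⟩ : ∃ r1 r2 rest, hand_class.toList = r1 :: r2 :: rest := by
    rcases h : hand_class.toList with _ | ⟨a, _ | ⟨b, t⟩⟩ <;> simp [h] at hpre ⊢
  have h0 : PySem.List.pyGet? (r1 :: r2 :: rest) (0 : Int) = some r1 := by
    have h : (0 : Int) ≤ (rest.length : Int) + 1 := by omega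
    simp [PySem.List.pyGet?, PySem.List.pyIdx?, h]
  have h1 : PySem.List.pyGet? (r1 :: r2 :: rest) (1 : Int) = some r2 := by
    simp [PySem.List.pyGet?, PySem.List.pyIdx?]
  rw [hhc]
  simp only [h0, h1, availSuits, show altDeadCardSet = deadCardSet from rfl,
    show altSuitChars = suitChars from rfl, Option.bind_some, Option.map_some, Option.getD_some]
  by_cases hlen : (r1 :: r2 :: rest).length = 2
  · rw [if_pos hlen, if_pos hlen]
    rw [length_filterMap_if suitChars
      (fun s => PySem.Set.contains (deadCardSet dead_cards) [r1, s]) (fun s => [r1, s])]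
  · rw [if_neg hlen, if_neg hlen]
    by_cases hs : PySem.Str.endswith hand_class "s" = true
    · rw [if_pos hs, if_pos hs]
      rw [length_filter_inter suitChars
        (fun s => !(PySem.Set.contains (deadCardSet dead_cards) [r1, s]))
        (fun s => !(PySem.Set.contains (deadCardSet dead_cards) [r2, s]))]
    · rw [if_neg hs, if_neg hs]
      exact offsuit_count
        (fun s => !(PySem.Set.contains (deadCardSet dead_cards) [r1, s]))
        (fun s => !(PySem.Set.contains (deadCardSet dead_cards) [r2, s]))
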